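-- pv_equiv track=rewrite | github.com/Kyle-Mendoza/boot-dev-python | c8_meditate.py | meditate
-- ===== SOURCE A (Python) =====
-- def meditate(mana, max_mana, energy, energy_drinks):
--     total_mana = mana
--     total_energy_drinks = energy_drinks
--     exhausted = -1
--
--     while energy != exhausted: # this must be set to -1
--         no_drinks = total_energy_drinks == 0 # boolean conditions
--         have_drinks = total_energy_drinks > 0
--         mana_full = total_mana == max_mana
--         no_energy = energy == 0
--
--         if mana_full:
--             break
--         elif no_energy:
--             if have_drinks:
--                 energy += 50
--                 total_energy_drinks -= 1
--                 continue
--             elif no_drinks: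
--                 break
--
--         total_mana += 1
--         energy -= 1
--
--     return total_mana, energy, total_energy_drinks
-- ===== SOURCE B (Python) =====
-- def meditate(mana, max_mana, energy, energy_drinks):
--     # Closed-form arithmetic: a few comparisons and one ceiling division
--     # replace the point-by-point meditation loop.
--     need = max_mana - mana
--     if 0 <= need <= energy:
--         # the energy on hand alone fills the mana pool
--         return max_mana, energy - need, energy_drinks
--     drinks = max(energy_drinks, 0)
--     if need < 0 or energy + 50 * drinks < need:
--         # mana can never land on max_mana: channel everything available
--         return mana + energy + 50 * drinks, 0, energy_drinks - drinks
--     # some drinks are opened; exactly enough to cover the shortfall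
--     opened = -((energy - need) // 50)
--     return max_mana, energy + 50 * opened - need, energy_drinks - opened
-- ===== Notes on version B (the rewrite author's own statement) =====
-- stated objective: faster
-- what changed: Replaces the unit-step simulation loop (one iteration per mana point and per drink) with closed-form arithmetic (a few comparisons plus one ceiling division); Pre_ restricts to the task's natural domain of nonnegative energy, since for negative energy A either loops forever (mana > max_mana) or returns values driven by its -1 exhaustion sentinel.
-- intended difference: On inputs with negative energy_drinks where the nonnegative energy runs out before mana fills, A's two drink booleans are both false, so it spends one phantom energy point and returns (mana+energy+1, -1, energy_drinks); B returns the intended (mana+energy, 0, energy_drinks), stopping when energy is gone and no drinks are available. — e.g. on meditate(0, 5, 2, -1): A returns (3, -1, -1), B returns (2, 0, -1)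
-- outside the precondition, e.g. on meditate(0, 5, -3, 2): A returns (5, -8, 2), B returns (5, 42, 1); on meditate(0, 5, -1, 2): A returns (0, -1, 2), B returns (5, 44, 1); on meditate(6, 5, -2, 0): A does not finish within the time limit, B returns (4, 0, 0)
import Mathlib
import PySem

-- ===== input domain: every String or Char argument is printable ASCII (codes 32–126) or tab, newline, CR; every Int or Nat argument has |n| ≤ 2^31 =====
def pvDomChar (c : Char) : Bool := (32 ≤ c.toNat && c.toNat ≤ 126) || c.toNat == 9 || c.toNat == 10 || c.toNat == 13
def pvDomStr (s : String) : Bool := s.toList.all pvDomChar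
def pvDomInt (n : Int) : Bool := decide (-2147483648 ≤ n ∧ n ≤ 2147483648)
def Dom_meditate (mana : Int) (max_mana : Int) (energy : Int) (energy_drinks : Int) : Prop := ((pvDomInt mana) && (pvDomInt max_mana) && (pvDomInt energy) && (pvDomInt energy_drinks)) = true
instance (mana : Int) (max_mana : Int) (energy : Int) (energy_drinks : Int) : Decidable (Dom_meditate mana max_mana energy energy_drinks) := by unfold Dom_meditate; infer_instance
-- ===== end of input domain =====

-- B replaces A's unit-step simulation loop by closed-form arithmetic (objective: faster, asymptotically).


-- ===== PORT A =====
-- the while-loop, fuel-bounded; the fuel in `meditate` strictly exceeds the number of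
-- iterations on every input admitted by Pre_meditate (the fuel-exhaustion value is never reached there)
def meditateLoop : Nat → Int → Int → Int → Int → Int × Int × Int
  | 0, tm, e, td, _ => (tm, e, td)
  | f+1, tm, e, td, mx =>
    if e = -1 then (tm, e, td)                 -- while energy != exhausted
    else if tm = mx then (tm, e, td)           -- if mana_full: break
    else if e = 0 then                         -- elif no_energy:
      if td > 0 then meditateLoop f tm (e + 50) (td - 1) mx   -- have_drinks: continue
      else if td = 0 then (tm, e, td)          -- no_drinks: break
      else meditateLoop f (tm + 1) (e - 1) td mx              -- fall-through
    else meditateLoop f (tm + 1) (e - 1) td mx -- total_mana += 1; energy -= 1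

def meditate (mana : Int) (max_mana : Int) (energy : Int) (energy_drinks : Int) : Int × Int × Int :=
  meditateLoop ((max_mana - mana).toNat + energy.toNat + 51 * energy_drinks.toNat + 4)
    mana energy energy_drinks max_mana

-- ===== PORT B =====
def meditate_alt (mana : Int) (max_mana : Int) (energy : Int) (energy_drinks : Int) : Int × Int × Int :=
  let need := max_mana - mana
  if 0 ≤ need ∧ need ≤ energy then
    (max_mana, energy - need, energy_drinks)
  else
    let drinks := max energy_drinks 0
    if need < 0 ∨ energy + 50 * drinks < need then
      (mana + energy + 50 * drinks, 0, energy_drinks - drinks)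
    else
      let opened := -(PySem.Int.floordiv (energy - need) 50)
      (max_mana, energy + 50 * opened - need, energy_drinks - opened)

-- ===== PRECONDITION & SPEC =====
-- Pre_ restricts to the task's natural domain of nonnegative energy: for negative energy A either
-- loops forever (mana > max_mana with energy < -1) or returns values driven by its accidental
-- "-1 means exhausted" sentinel (immediate return at energy == -1, draining energy ever deeper
-- negative below -1), which no caller of a meditation routine would specify.
def Pre_meditate (mana : Int) (max_mana : Int) (energy : Int) (energy_drinks : Int) : Prop :=
  0 ≤ energy
instance (mana : Int) (max_mana : Int) (energy : Int) (energy_drinks : Int) : Decidable (Pre_meditate mana max_mana energy energy_drinks) := by unfold Pre_meditate; infer_instance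

def pvWitness_meditate : Int × Int × Int × Int := (0, 5, 3, 1)

-- On inputs with energy_drinks < 0 where the nonnegative energy runs out before mana fills, A's two
-- drink booleans are both false, so it spends one phantom energy point and returns
-- (mana+energy+1, -1, energy_drinks); B returns the intended (mana+energy, 0, energy_drinks).
def D_meditate (mana : Int) (max_mana : Int) (energy : Int) (energy_drinks : Int) : Prop :=
  energy_drinks < 0 ∧ 0 ≤ energy ∧ mana ≠ max_mana ∧ (max_mana < mana ∨ energy < max_mana - mana)
instance (mana : Int) (max_mana : Int) (energy : Int) (energy_drinks : Int) : Decidable (D_meditate mana max_mana energy energy_drinks) := by unfold D_meditate; infer_instance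

def Spec_meditate (mana : Int) (max_mana : Int) (energy : Int) (energy_drinks : Int) (out : Int × Int × Int) : Prop := ¬ D_meditate mana max_mana energy energy_drinks → out = meditate_alt mana max_mana energy energy_drinks
instance (mana : Int) (max_mana : Int) (energy : Int) (energy_drinks : Int) (out : Int × Int × Int) : Decidable (Spec_meditate mana max_mana energy energy_drinks out) := by unfold Spec_meditate; infer_instance

def pvDiffWitness_meditate : Int × Int × Int × Int := (0, 5, 2, -1)
def pvDiffWitnessOut_meditate : (Int × Int × Int) × (Int × Int × Int) := ((3, -1, -1), (2, 0, -1))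

-- ===== CLAIM (what is proved, stated in full; the proofs are below) =====
def Claim_unchanged_meditate : Prop := ∀ (mana : Int) (max_mana : Int) (energy : Int) (energy_drinks : Int), Dom_meditate mana max_mana energy energy_drinks → Pre_meditate mana max_mana energy energy_drinks → Spec_meditate mana max_mana energy energy_drinks (meditate mana max_mana energy energy_drinks)
def Claim_changed_meditate : Prop := Dom_meditate (pvDiffWitness_meditate.1) (pvDiffWitness_meditate.2.1) (pvDiffWitness_meditate.2.2.1) (pvDiffWitness_meditate.2.2.2) ∧ Pre_meditate (pvDiffWitness_meditate.1) (pvDiffWitness_meditate.2.1) (pvDiffWitness_meditate.2.2.1) (pvDiffWitness_meditate.2.2.2) ∧ D_meditate (pvDiffWitness_meditate.1) (pvDiffWitness_meditate.2.1) (pvDiffWitness_meditate.2.2.1) (pvDiffWitness_meditate.2.2.2) ∧ meditate (pvDiffWitness_meditate.1) (pvDiffWitness_meditate.2.1) (pvDiffWitness_meditate.2.2.1) (pvDiffWitness_meditate.2.2.2) = pvDiffWitnessOut_meditate.1 ∧ meditate_alt (pvDiffWitness_meditate.1) (pvDiffWitness_meditate.2.1) (pvDiffWitness_meditate.2.2.1)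 (pvDiffWitness_meditate.2.2.2) = pvDiffWitnessOut_meditate.2 ∧ pvDiffWitnessOut_meditate.1 ≠ pvDiffWitnessOut_meditate.2
def Claim_exact_meditate : Prop := ∀ (mana : Int) (max_mana : Int) (energy : Int) (energy_drinks : Int), Dom_meditate mana max_mana energy energy_drinks → Pre_meditate mana max_mana energy energy_drinks → D_meditate mana max_mana energy energy_drinks → meditate mana max_mana energy energy_drinks ≠ meditate_alt mana max_mana energy energy_drinks

-- ===== LEMMAS AND PROOFS =====

-- closed form of the loop's drain-then-drink phase (proof-side helper)
def medG (tm e td mx : Int) : Int × Int × Int :=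
  if mx < tm ∨ e + 50 * td < mx - tm then (tm + e + 50 * td, 0, 0)
  else if mx - tm ≤ e then (mx, e - (mx - tm), td)
  else (mx, 50 * ((mx - tm - e + 49) / 50) - (mx - tm - e), td - (mx - tm - e + 49) / 50)

theorem loop_exhausted (f : Nat) (tm td mx : Int) : meditateLoop f tm (-1) td mx = (tm, -1, td) := by
  cases f <;> simp [meditateLoop]

theorem loop_full (f : Nat) (e td mx : Int) : meditateLoop f mx e td mx = (mx, e, td) := by
  cases f <;> simp [meditateLoop]

theorem lemA (f : Nat) : ∀ (tm e td mx : Int), tm ≤ mx → (mx - tm).toNat ≤ f →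
    (e < -1 ∨ mx - tm ≤ e) → meditateLoop f tm e td mx = (mx, e - (mx - tm), td) := by
  induction f with
  | zero =>
    intro tm e td mx h1 h2 h3
    have : tm = mx := by omega
    subst this
    simp [meditateLoop]
  | succ f ih =>
    intro tm e td mx h1 h2 h3
    by_cases hfull : tm = mx
    · subst hfull; rw [loop_full]; simp
    · have hlt : tm < mx := by omega
      have he1 : e ≠ -1 := by omega
      have he0 : e ≠ 0 := by omega
      simp only [meditateLoop, if_neg he1, if_neg hfull, if_neg he0]
      rw [ih (tm + 1) (e - 1) td mx (by omega) (by omega) (by omega)]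
      simp; omega

theorem medG_spend (tm e td mx : Int) (h1 : tm ≠ mx) :
    medG tm e td mx = medG (tm + 1) (e - 1) td mx := by
  unfold medG
  split_ifs <;> simp [Prod.mk.injEq] <;> omega

theorem medG_drink (tm td mx : Int) (h1 : tm ≠ mx) (h2 : 1 ≤ td) :
    medG tm 0 td mx = medG tm 50 (td - 1) mx := by
  unfold medG
  split_ifs <;> simp [Prod.mk.injEq] <;> omega

theorem lemB (f : Nat) : ∀ (tm e td mx : Int), 0 ≤ e → 0 ≤ td →
    e.toNat + 51 * td.toNat + 1 ≤ f → meditateLoop f tm e td mx = medG tm e td mx := by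
  induction f with
  | zero => intro tm e td mx _ _ h; omega
  | succ f ih =>
    intro tm e td mx he htd hf
    have he1 : e ≠ -1 := by omega
    by_cases hfull : tm = mx
    · subst hfull
      rw [loop_full]
      unfold medG
      split_ifs <;> simp [Prod.mk.injEq] <;> omega
    · by_cases he0 : e = 0
      · subst he0
        by_cases hd : td > 0
        · have hstep : meditateLoop (f + 1) tm 0 td mx = meditateLoop f tm 50 (td - 1) mx := by
            simp [meditateLoop, hfull, hd]
          rw [hstep, ih tm 50 (td - 1) mx (by omega) (by omega) (by omega)]
          exact (medG_drink tm td mx hfull (by omega)).symm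
        · have hd0 : td = 0 := by omega
          subst hd0
          have hstep : meditateLoop (f + 1) tm 0 0 mx = (tm, 0, 0) := by
            simp [meditateLoop, hfull]
          rw [hstep]
          unfold medG
          split_ifs <;> simp [Prod.mk.injEq] <;> omega
      · simp only [meditateLoop, if_neg he1, if_neg hfull, if_neg he0]
        rw [ih (tm + 1) (e - 1) td mx (by omega) htd (by omega)]
        exact (medG_spend tm e td mx hfull).symm

theorem lemC (f : Nat) : ∀ (tm e td mx : Int), 0 ≤ e → td < 0 →
    (mx < tm ∨ e < mx - tm) → e.toNat + 2 ≤ f →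
    meditateLoop f tm e td mx = (tm + e + 1, -1, td) := by
  induction f with
  | zero => intro tm e td mx _ _ _ h; omega
  | succ f ih =>
    intro tm e td mx he htd hcond hf
    have he1 : e ≠ -1 := by omega
    have hfull : tm ≠ mx := by omega
    by_cases he0 : e = 0
    · subst he0
      have hd1 : ¬ td > 0 := by omega
      have hd2 : td ≠ 0 := by omega
      have hstep : meditateLoop (f + 1) tm 0 td mx = meditateLoop f (tm + 1) (-1) td mx := by
        simp [meditateLoop, hfull, hd1, hd2]
      rw [hstep, loop_exhausted]
      simp
    · simp only [meditateLoop, if_neg he1, if_neg hfull, if_neg he0]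
      rw [ih (tm + 1) (e - 1) td mx (by omega) htd (by omega) (by omega)]
      simp

theorem floordiv50 (a : Int) : PySem.Int.floordiv a 50 = a / 50 :=
  PySem.Int.floordiv_eq_ediv_of_pos (by norm_num)

-- ===== VERDICT (by name: the statement is the Claim_ definition above) =====
theorem meditate_spec : Claim_unchanged_meditate := by
  intro m mx e d _ hPre hnD
  have he0 : (0:Int) ≤ e := hPre
  unfold meditate
  by_cases hfull : m = mx
  · subst hfull
    rw [loop_full]
    unfold meditate_alt
    rw [if_pos ⟨by omega, by omega⟩]
    simp
  · by_cases hA : m < mx ∧ mx - m ≤ e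
    · rw [lemA _ m e d mx (le_of_lt hA.1) (by omega) (Or.inr hA.2)]
      unfold meditate_alt
      rw [if_pos ⟨by omega, hA.2⟩]
    · have hcond : mx < m ∨ e < mx - m := by omega
      have hd : 0 ≤ d := by
        by_contra hd
        exact hnD ⟨by omega, he0, hfull, hcond⟩
      rw [lemB _ m e d mx he0 hd (by omega)]
      unfold meditate_alt medG
      have hmax : max d 0 = d := by omega
      simp only [hmax, floordiv50]
      rcases hcond with h | h <;> split_ifs <;> simp [Prod.mk.injEq] <;> omega

theorem meditate_changed : Claim_changed_meditate := by
  unfold Claim_changed_meditate; decide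

theorem meditate_tight : Claim_exact_meditate := by
  intro m mx e d _ _ hD
  obtain ⟨hd, he, hfull, hcond⟩ := hD
  unfold meditate
  rw [lemC _ m e d mx he hd hcond (by omega)]
  unfold meditate_alt
  have hmax : max d 0 = 0 := by omega
  simp only [hmax]
  rcases hcond with h | h <;> split_ifs <;> simp [Prod.mk.injEq] <;> omega
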